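-- pv_equiv track=rewrite | github.com/speelbreaker12/opus-trader | tools/ci/lint_pr_template_sections.py | arch_item_ranges
-- ===== SOURCE A (Python) =====
-- from typing import Dict, List, Optional, Sequence, Tuple
--
-- ARCH_ITEMS: Sequence[str] = (
--     "1. Architectural-level failure modes (not just implementation bugs)",
--     "2. Systemic risks and emergent behaviors",
--     "3. Compounding failure scenarios",
--     "4. Hidden assumptions that could be violated",
--     "5. Long-term maintenance hazards",
-- )
--
-- def normalize_space(text: str) -> str:
--     return " ".join(text.strip().split())
--
-- def normalize_key(text: str) -> str:
--     return normalize_space(text).rstrip(":").lower()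
--
-- def arch_item_ranges(lines: Sequence[str], start: int, end: int) -> Dict[str, Tuple[int, int]]:
--     ranges: Dict[str, Tuple[int, int]] = {}
--     item_points: List[Tuple[str, int]] = []
--     normalized_targets = {normalize_key(item): item for item in ARCH_ITEMS}
--     for idx in range(start + 1, end):
--         line = normalize_space(lines[idx])
--         key = normalize_key(line)
--         if key in normalized_targets:
--             item_points.append((normalized_targets[key], idx))
--     for i, (item, idx) in enumerate(item_points):
--         item_end = item_points[i + 1][1] if i + 1 < len(item_points) else end
--         ranges[item] = (idx, item_end)
--     return ranges
-- ===== SOURCE B (Python) =====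
-- from typing import Dict, List, Optional, Sequence, Tuple
--
-- ARCH_ITEMS: Sequence[str] = (
--     "1. Architectural-level failure modes (not just implementation bugs)",
--     "2. Systemic risks and emergent behaviors",
--     "3. Compounding failure scenarios",
--     "4. Hidden assumptions that could be violated",
--     "5. Long-term maintenance hazards",
-- )
--
-- def normalize_space(text: str) -> str:
--     return " ".join(text.strip().split())
--
-- def normalize_key(text: str) -> str:
--     return normalize_space(text).rstrip(":").lower()
--
-- def arch_item_ranges(lines: Sequence[str], start: int, end: int) -> Dict[str, Tuple[int, int]]:
--     # Single streaming pass: keep only the last matched item; close it when the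
--     # next match (or the end of the section) provides its upper boundary.
--     ranges: Dict[str, Tuple[int, int]] = {}
--     normalized_targets = {normalize_key(item): item for item in ARCH_ITEMS}
--     prev: Optional[Tuple[str, int]] = None
--     for idx in range(start + 1, end):
--         line = normalize_space(lines[idx])
--         key = normalize_key(line)
--         if key in normalized_targets:
--             if prev is not None:
--                 ranges[prev[0]] = (prev[1], idx)
--             prev = (normalized_targets[key], idx)
--     if prev is not None:
--         ranges[prev[0]] = (prev[1], end)
--     return ranges
-- ===== Notes on version B (the rewrite author's own statement) =====
-- stated objective: alternative
-- what changed: B replaces A's two-phase scheme (collect all matched item points into a list, then a second indexed pass with a lookahead item_points[i+1]) by a single streaming pass that keeps only the last unmatched boundary and closes it on the next match or at end.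
import Mathlib
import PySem

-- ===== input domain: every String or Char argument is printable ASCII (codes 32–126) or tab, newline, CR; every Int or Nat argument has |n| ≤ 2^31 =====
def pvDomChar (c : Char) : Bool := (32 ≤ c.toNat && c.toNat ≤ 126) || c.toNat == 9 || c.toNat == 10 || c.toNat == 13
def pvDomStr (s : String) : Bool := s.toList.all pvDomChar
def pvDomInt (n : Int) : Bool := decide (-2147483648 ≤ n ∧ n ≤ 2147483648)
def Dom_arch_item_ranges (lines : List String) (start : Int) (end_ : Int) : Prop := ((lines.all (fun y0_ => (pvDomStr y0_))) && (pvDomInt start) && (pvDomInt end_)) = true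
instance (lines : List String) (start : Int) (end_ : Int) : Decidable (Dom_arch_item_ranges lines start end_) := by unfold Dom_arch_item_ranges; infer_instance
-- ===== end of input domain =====

-- B replaces A's collect-points-then-lookahead scheme by a single streaming pass keeping only the
-- last open boundary (alternative decomposition, same cost).

-- ===== shared module-level helpers (identical in Source A and Source B) =====
def pvArchItems : List String :=
  ["1. Architectural-level failure modes (not just implementation bugs)",
   "2. Systemic risks and emergent behaviors",
   "3. Compounding failure scenarios",
   "4. Hidden assumptions that could be violated",
   "5. Long-term maintenance hazards"]

def pvNormalizeSpace (text : String) : String :=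
  PySem.Str.join " " (PySem.Str.split₀ (PySem.Str.strip text))

-- s.rstrip(":") ported by hand (PySem has no rstrip-with-chars): drop trailing ':' characters; exact.
def pvRstripColon (s : String) : String :=
  String.ofList ((s.toList.reverse.dropWhile (· == ':')).reverse)

def pvNormalizeKey (text : String) : String :=
  PySem.Str.lower (pvRstripColon (pvNormalizeSpace text))

def pvTargets : PySem.Dict String String :=
  pvArchItems.foldl (fun d item => d.insert (pvNormalizeKey item) item) PySem.Dict.empty

-- ===== PORT A =====
def arch_item_ranges (lines : List String) (start : Int) (end_ : Int) : List (String × Int × Int) :=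
  let item_points : List (String × Int) :=
    (PySem.List.pyRange (start + 1) end_ 1).foldl
      (fun acc idx =>
        let line := pvNormalizeSpace (PySem.List.pyGetD lines idx "")
        let key := pvNormalizeKey line
        match pvTargets.get? key with
        | some item => acc ++ [(item, idx)]
        | none => acc) []
  let ranges : PySem.Dict String (Int × Int) :=
    (PySem.List.enumerate item_points 0).foldl
      (fun d p =>
        let item_end : Int :=
          if p.1 + 1 < (item_points.length : Int)
          then (PySem.List.pyGetD item_points (p.1 + 1) ("", 0)).2
          else end_
        d.insert p.2.1 (p.2.2, item_end)) PySem.Dict.empty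
  ranges.items

-- ===== PORT B =====
def arch_item_ranges_alt (lines : List String) (start : Int) (end_ : Int) : List (String × Int × Int) :=
  let st : PySem.Dict String (Int × Int) × Option (String × Int) :=
    (PySem.List.pyRange (start + 1) end_ 1).foldl
      (fun st idx =>
        let line := pvNormalizeSpace (PySem.List.pyGetD lines idx "")
        let key := pvNormalizeKey line
        match pvTargets.get? key with
        | some item =>
          match st.2 with
          | some prev => (st.1.insert prev.1 (prev.2, idx), some (item, idx))
          | none => (st.1, some (item, idx))
        | none => st) (PySem.Dict.empty, none)
  (match st.2 with
   | some prev => st.1.insert prev.1 (prev.2, end_)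
   | none => st.1).items

-- ===== PRECONDITION & SPEC =====
-- Pre_ excludes exactly the inputs where lines[idx] raises IndexError in both Pythons:
-- some idx in range(start+1, end) outside [-len(lines), len(lines)-1].
def Pre_arch_item_ranges (lines : List String) (start : Int) (end_ : Int) : Prop :=
  end_ ≤ start + 1 ∨ (-(lines.length : Int) ≤ start + 1 ∧ end_ ≤ (lines.length : Int))
instance (lines : List String) (start : Int) (end_ : Int) : Decidable (Pre_arch_item_ranges lines start end_) := by unfold Pre_arch_item_ranges; infer_instance

def pvWitness_arch_item_ranges : List String × Int × Int :=
  (["## Review", "2. Systemic risks and emergent behaviors", "- note", "5. Long-term maintenance hazards"], 0, 4)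

def Spec_arch_item_ranges (lines : List String) (start : Int) (end_ : Int) (out : List (String × Int × Int)) : Prop := out = arch_item_ranges_alt lines start end_
instance (lines : List String) (start : Int) (end_ : Int) (out : List (String × Int × Int)) : Decidable (Spec_arch_item_ranges lines start end_ out) := by unfold Spec_arch_item_ranges; infer_instance

-- ===== CLAIM (what is proved, stated in full; the proofs are below) =====
def Claim_equal_arch_item_ranges : Prop := ∀ (lines : List String) (start : Int) (end_ : Int), Dom_arch_item_ranges lines start end_ → Pre_arch_item_ranges lines start end_ → Spec_arch_item_ranges lines start end_ (arch_item_ranges lines start end_)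

-- ===== LEMMAS AND PROOFS =====

-- the match tried at index idx (both ports compute exactly this)
def pvMatch (lines : List String) (idx : Int) : Option String :=
  pvTargets.get? (pvNormalizeKey (pvNormalizeSpace (PySem.List.pyGetD lines idx "")))

def pvPoints (lines : List String) (idxs : List Int) : List (String × Int) :=
  idxs.filterMap (fun idx => (pvMatch lines idx).map (fun it => (it, idx)))

-- closing a list of match points against the next point's index (or end_)
def pvClose (e : Int) (d : PySem.Dict String (Int × Int)) : List (String × Int) → PySem.Dict String (Int × Int)
  | [] => d
  | [p] => d.insert p.1 (p.2, e)
  | p :: q :: rest => pvClose e (d.insert p.1 (p.2, q.2)) (q :: rest)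

theorem pvPointsLoopEq (lines : List String) (idxs : List Int) (acc : List (String × Int)) :
    idxs.foldl
      (fun acc idx =>
        let line := pvNormalizeSpace (PySem.List.pyGetD lines idx "")
        let key := pvNormalizeKey line
        match pvTargets.get? key with
        | some item => acc ++ [(item, idx)]
        | none => acc) acc = acc ++ pvPoints lines idxs := by
  induction idxs generalizing acc with
  | nil => simp [pvPoints]
  | cons idx rest ih =>
    simp only [List.foldl_cons, pvPoints, List.filterMap_cons]
    cases h : pvMatch lines idx with
    | none =>
      simp only [pvMatch] at h
      simp [h, ih, pvPoints]
    | some item =>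
      simp only [pvMatch] at h
      simp [h, ih, pvPoints]

theorem pvCloseLoopEq (e : Int) (full : List (String × Int)) :
    ∀ (suf : List (String × Int)) (j : Nat) (d : PySem.Dict String (Int × Int)),
      full.drop j = suf →
      (PySem.List.enumerate suf (j : Int)).foldl
        (fun d p =>
          let item_end : Int :=
            if p.1 + 1 < (full.length : Int)
            then (PySem.List.pyGetD full (p.1 + 1) ("", 0)).2
            else e
          d.insert p.2.1 (p.2.2, item_end)) d = pvClose e d suf := by
  intro suf
  induction suf with
  | nil => intro j d _; simp [PySem.List.enumerate, pvClose]
  | cons p rest ih =>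
    intro j d hdrop
    have hj : j < full.length := by
      by_contra h
      simp [List.drop_eq_nil_of_le (Nat.le_of_not_lt h)] at hdrop
    have hdrop' : full.drop (j + 1) = rest := by
      have := congrArg List.tail hdrop
      simpa [List.tail_drop] using this
    rw [PySem.List.enumerate_cons, List.foldl_cons]
    have hlen : full.length = j + 1 + rest.length := by
      have := congrArg List.length hdrop
      simp at this
      omega
    cases rest with
    | nil =>
      have hcond : ¬ ((j : Int) + 1 < (full.length : Int)) := by
        simp at hlen; omega
      simp only [hcond, if_false]
      simp [pvClose, PySem.List.enumerate]
    | cons q rest' =>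
      have hcond : (j : Int) + 1 < (full.length : Int) := by
        simp at hlen ⊢; omega
      have hget : PySem.List.pyGetD full ((j : Int) + 1) ("", 0) = q := by
        have hq : full[j + 1]? = some q := by
          have : (full.drop (j + 1)).head? = some q := by rw [hdrop']; rfl
          simpa [List.head?_drop] using this
        have : PySem.List.pyGetD full ((j + 1 : Nat) : Int) ("", 0) = full.getD (j + 1) ("", 0) :=
          PySem.List.pyGetD_natCast full (j + 1) ("", 0)
        rw [show ((j : Int) + 1) = ((j + 1 : Nat) : Int) by push_cast; ring, this,
            List.getD_eq_getElem?_getD, hq]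
        rfl
      simp only [hcond, if_true, hget]
      have := ih (j + 1) (d.insert p.1 (p.2, q.2)) hdrop'
      simpa [pvClose, Int.natCast_add] using this

def pvFinalize (e : Int) (st : PySem.Dict String (Int × Int) × Option (String × Int)) :
    PySem.Dict String (Int × Int) :=
  match st.2 with
  | some prev => st.1.insert prev.1 (prev.2, e)
  | none => st.1

theorem pvStreamEq (lines : List String) (e : Int) (idxs : List Int) :
    ∀ (d : PySem.Dict String (Int × Int)) (pnd : Option (String × Int)),
      pvFinalize e
        (idxs.foldl
          (fun st idx =>
            let line := pvNormalizeSpace (PySem.List.pyGetD lines idx "")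
            let key := pvNormalizeKey line
            match pvTargets.get? key with
            | some item =>
              match st.2 with
              | some prev => (st.1.insert prev.1 (prev.2, idx), some (item, idx))
              | none => (st.1, some (item, idx))
            | none => st) (d, pnd)) =
      pvClose e d (pnd.toList ++ pvPoints lines idxs) := by
  induction idxs with
  | nil =>
    intro d pnd
    cases pnd <;> simp [pvFinalize, pvPoints, pvClose]
  | cons idx rest ih =>
    intro d pnd
    simp only [List.foldl_cons, pvPoints, List.filterMap_cons]
    cases h : pvMatch lines idx with
    | none =>
      simp only [pvMatch] at h
      simpa [h, pvPoints] using ih d pnd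
    | some item =>
      simp only [pvMatch] at h
      cases pnd with
      | none =>
        simpa [h, pvPoints] using ih d (some (item, idx))
      | some prev =>
        have := ih (d.insert prev.1 (prev.2, idx)) (some (item, idx))
        simp only [h]
        simpa [pvPoints, pvClose] using this

-- ===== VERDICT (by name: the statement is the Claim_ definition above) =====
theorem arch_item_ranges_spec : Claim_equal_arch_item_ranges := by
  intro lines start end_ _ _
  unfold Spec_arch_item_ranges arch_item_ranges arch_item_ranges_alt
  rw [pvPointsLoopEq lines _ []]
  have hA := pvCloseLoopEq end_ (pvPoints lines (PySem.List.pyRange (start + 1) end_ 1))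
    (pvPoints lines (PySem.List.pyRange (start + 1) end_ 1)) 0 PySem.Dict.empty (by simp)
  have hB := pvStreamEq lines end_ (PySem.List.pyRange (start + 1) end_ 1) PySem.Dict.empty none
  unfold pvFinalize at hB
  simp only [Nat.cast_zero] at hA
  simp only [Option.toList_none, List.nil_append] at hB
  simp only [List.nil_append, hA, hB]
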